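-- pv_equiv track=rewrite | github.com/dudamarlena/pyc_source | pycfiles/EMMO-1.0.0a10-py3-none-any/ontodoc.cpython-37.opt-1.py | append_pandoc_options
-- ===== SOURCE A (Python) =====
-- def append_pandoc_options(options, updates):
--     """Append `updates` to pandoc options `options`.
--
--     Parameters
--     ----------
--     options : sequence
--         Sequence with initial Pandoc options.
--     updates : sequence of str
--         Sequence of strings of the form "--longoption=value", where
--         ``longoption`` is a valid pandoc long option and ``value`` is the
--         new value.  The "=value" part is optional.
--
--         Strings of the form "no-longoption" will filter out "--longoption"
--         from `options`.
--
--     Returns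
--     -------
--     new_options : list
--         Updated pandoc options.
--     """
--     no_options = set('no-highlight')
--     if not updates:
--         return list(options)
--     u = {}
--     for s in updates:
--         k, sep, v = s.partition('=')
--         u[k.lstrip('-')] = v if sep else None
--         filter_out = set((k for k, v in u.items() if k.startswith('no-') if k not in no_options))
--         _filter_out = set(('--' + k[3:] for k in filter_out))
--         new_options = [opt for opt in options if opt.partition('=')[0] not in _filter_out]
--         new_options.extend(['--%s' % k if v is None else '--%s=%s' % (k, v) for k, v in u.items() if k not in filter_out])
--
--     return new_options
-- ===== SOURCE B (Python) =====
-- def append_pandoc_options(options, updates):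
--     """Append `updates` to pandoc options `options` (single-pass rewrite)."""
--     if not updates:
--         return list(options)
--     remove = set()
--     additions = {}
--     for s in updates:
--         k, sep, v = s.partition('=')
--         key = k.lstrip('-')
--         if key.startswith('no-'):
--             remove.add('--' + key[3:])
--         else:
--             additions[key] = v if sep else None
--     out = [opt for opt in options if opt.partition('=')[0] not in remove]
--     out.extend('--%s' % k if v is None else '--%s=%s' % (k, v)
--                for k, v in additions.items())
--     return out
-- ===== Notes on version B (the rewrite author's own statement) =====
-- stated objective: faster
-- what changed: Replaces A's loop that rebuilds the filter sets and the whole output list from scratch on every update with a single pass collecting a removal set and an additions dict, followed by one filter-and-extend; the inert no_options character set is dropped.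
import Mathlib
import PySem

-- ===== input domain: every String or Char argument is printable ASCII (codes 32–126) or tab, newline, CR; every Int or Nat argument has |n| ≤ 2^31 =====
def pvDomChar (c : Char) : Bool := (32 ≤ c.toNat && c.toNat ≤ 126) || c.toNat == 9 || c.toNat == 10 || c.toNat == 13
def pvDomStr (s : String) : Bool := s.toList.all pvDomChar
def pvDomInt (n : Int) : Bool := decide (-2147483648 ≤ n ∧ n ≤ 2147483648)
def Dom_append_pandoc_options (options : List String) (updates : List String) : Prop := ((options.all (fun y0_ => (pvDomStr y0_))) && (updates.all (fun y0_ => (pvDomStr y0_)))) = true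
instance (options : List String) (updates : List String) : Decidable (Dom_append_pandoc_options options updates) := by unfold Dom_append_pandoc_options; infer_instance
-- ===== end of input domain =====

-- B replaces A's per-update rebuild of the filter sets and output list with one pass
-- collecting a removal set and an additions dict, then a single filter-and-extend: asymptotically fewer passes (objective: faster, measured).

-- shared helpers: hand ports of Python constructs both sources use
-- s.partition('=') — exact for the single-character separator '=': (head, sep-found?, tail)
def pvPartEq : List Char → List Char × Bool × List Char
  | [] => ([], false, [])
  | c :: rest =>
    if c = '=' then ([], true, rest)
    else
      let r := pvPartEq rest
      (c :: r.1, r.2.1, r.2.2)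

-- k.lstrip('-') — exact for the single-character strip set '-'
def pvLstripDash (k : List Char) : List Char := k.dropWhile (· == '-')

-- k.startswith('no-')
def pvStartsNo (k : List Char) : Bool := PySem.Chars.startswith k ['n', 'o', '-']

-- '--%s' % k  /  '--%s=%s' % (k, v)
def pvFmt (kv : List Char × Option (List Char)) : String :=
  match kv.2 with
  | none => String.ofList ('-' :: '-' :: kv.1)
  | some v => String.ofList ('-' :: '-' :: (kv.1 ++ '=' :: v))

-- ===== PORT A =====
-- no_options = set('no-highlight')  (a set of 1-character strings)
def pvNoOptions : PySem.Set (List Char) :=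
  PySem.Set.ofList ("no-highlight".toList.map (fun c => [c]))

-- the body of A's loop after 'u[...] = ...': recompute filter_out, _filter_out, new_options from u
def pvExtractA (options : List String) (u : PySem.Dict (List Char) (Option (List Char))) : List String :=
  let filter_out : PySem.Set (List Char) := PySem.Set.ofList
    ((u.items.filter (fun kv => pvStartsNo kv.1 && !(PySem.Set.contains pvNoOptions kv.1))).map (·.1))
  let filter_out2 : PySem.Set (List Char) := PySem.Set.ofList (filter_out.map (fun k => '-' :: '-' :: k.drop 3))
  (options.filter (fun opt => !(PySem.Set.contains filter_out2 (pvPartEq opt.toList).1)))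
    ++ (u.items.filter (fun kv => !(PySem.Set.contains filter_out kv.1))).map pvFmt

def pvStepA (options : List String)
    (st : PySem.Dict (List Char) (Option (List Char)) × List String) (s : String) :
    PySem.Dict (List Char) (Option (List Char)) × List String :=
  let p := pvPartEq s.toList
  let u := st.1.insert (pvLstripDash p.1) (if p.2.1 then some p.2.2 else none)
  (u, pvExtractA options u)

def append_pandoc_options (options : List String) (updates : List String) : List String :=
  if updates.isEmpty then options
  else (updates.foldl (pvStepA options) (PySem.Dict.empty, [])).2

-- ===== PORT B =====
def pvStepB (st : PySem.Set (List Char) × PySem.Dict (List Char) (Option (List Char))) (s : String) :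
    PySem.Set (List Char) × PySem.Dict (List Char) (Option (List Char)) :=
  let p := pvPartEq s.toList
  let key := pvLstripDash p.1
  if pvStartsNo key then (PySem.Set.add st.1 ('-' :: '-' :: key.drop 3), st.2)
  else (st.1, st.2.insert key (if p.2.1 then some p.2.2 else none))

def append_pandoc_options_alt (options : List String) (updates : List String) : List String :=
  if updates.isEmpty then options
  else
    let st := updates.foldl pvStepB (PySem.Set.empty, PySem.Dict.empty)
    (options.filter (fun opt => !(PySem.Set.contains st.1 (pvPartEq opt.toList).1)))
      ++ st.2.items.map pvFmt

-- ===== PRECONDITION & SPEC =====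
def Spec_append_pandoc_options (options : List String) (updates : List String) (out : List String) : Prop := out = append_pandoc_options_alt options updates
instance (options : List String) (updates : List String) (out : List String) : Decidable (Spec_append_pandoc_options options updates out) := by unfold Spec_append_pandoc_options; infer_instance

-- ===== CLAIM (what is proved, stated in full; the proofs are below) =====
def Claim_equal_append_pandoc_options : Prop := ∀ (options : List String) (updates : List String), Dom_append_pandoc_options options updates → Spec_append_pandoc_options options updates (append_pandoc_options options updates)

-- ===== LEMMAS AND PROOFS =====

-- the dict-only part of A's step
def pvUStep (u : PySem.Dict (List Char) (Option (List Char))) (s : String) :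
    PySem.Dict (List Char) (Option (List Char)) :=
  let p := pvPartEq s.toList
  u.insert (pvLstripDash p.1) (if p.2.1 then some p.2.2 else none)

-- keys starting with 'no-' are never in set('no-highlight') (its members are single characters)
lemma pv_no_options_irrelevant (k : List Char) (h : pvStartsNo k = true) :
    PySem.Set.contains pvNoOptions k = false := by
  cases hc : PySem.Set.contains pvNoOptions k with
  | false => rfl
  | true =>
    exfalso
    have hlen : 3 ≤ k.length := by
      have := (PySem.Chars.startswith_iff k ['n', 'o', '-']).1 h
      simpa using this.length_le
    have hmem : k ∈ pvNoOptions := by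
      have : decide (k ∈ pvNoOptions) = true := by
        simpa [PySem.Set.contains] using hc
      exact of_decide_eq_true this
    have : k ∈ ("no-highlight".toList.map (fun c => [c])) := by
      simpa [pvNoOptions, PySem.Set.mem_ofList] using hmem
    rcases List.mem_map.1 this with ⟨c, _, hk⟩
    rw [← hk] at hlen
    simp at hlen

lemma pvA_pred_eq (k : List Char) :
    (pvStartsNo k && !(PySem.Set.contains pvNoOptions k)) = pvStartsNo k := by
  cases h : pvStartsNo k with
  | false => rfl
  | true => rw [pv_no_options_irrelevant k h]; rfl

-- overwriting a 'no-…' key does not change the non-'no-' filtered items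
lemma pv_filter_map_replace_false (l : List ((List Char) × Option (List Char))) (k : List Char)
    (v : Option (List Char)) (hq : pvStartsNo k = true) :
    (l.map (fun p => if p.1 = k then (k, v) else p)).filter (fun kv => !pvStartsNo kv.1)
      = l.filter (fun kv => !pvStartsNo kv.1) := by
  induction l with
  | nil => rfl
  | cons p rest ih =>
    simp only [List.map_cons, List.filter_cons]
    by_cases hp : p.1 = k
    · rw [if_pos hp, ih]
      simp [hq, hp]
    · rw [if_neg hp, ih]

-- the overwrite map commutes with the non-'no-' key-filter (it preserves first components)
lemma pv_filter_map_replace_true (l : List ((List Char) × Option (List Char))) (k : List Char)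
    (v : Option (List Char)) (hq : pvStartsNo k = false) :
    (l.map (fun p => if p.1 = k then (k, v) else p)).filter (fun kv => !pvStartsNo kv.1)
      = (l.filter (fun kv => !pvStartsNo kv.1)).map (fun p => if p.1 = k then (k, v) else p) := by
  induction l with
  | nil => rfl
  | cons p rest ih =>
    simp only [List.map_cons, List.filter_cons]
    by_cases hp : p.1 = k
    · rw [if_pos hp, ih]
      simp [hq, hp]
    · rw [if_neg hp]
      cases hqq : pvStartsNo p.1 with
      | true => simp [ih]
      | false =>
        simp [ih]
        intro hpk
        exact absurd hpk hp

lemma pv_set_contains_eq_decide (s : PySem.Set (List Char)) (x : List Char) :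
    PySem.Set.contains s x = decide (x ∈ s) := by
  simp [PySem.Set.contains]

lemma pv_contains_any (d : PySem.Dict (List Char) (Option (List Char))) (k : List Char) :
    d.contains k = d.items.any (fun p => p.1 == k) := by
  simp [PySem.Dict.contains]

-- invariant relating A's dict to B's (removal set, additions dict)
def pvInv (u : PySem.Dict (List Char) (Option (List Char))) (r : PySem.Set (List Char))
    (d : PySem.Dict (List Char) (Option (List Char))) : Prop :=
  d.items = u.items.filter (fun kv => !pvStartsNo kv.1)
  ∧ ∀ x, x ∈ r ↔ ∃ k ∈ u.keys, pvStartsNo k = true ∧ x = '-' :: '-' :: k.drop 3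

lemma pv_inv_insert_no (u : PySem.Dict (List Char) (Option (List Char)))
    (r : PySem.Set (List Char)) (d : PySem.Dict (List Char) (Option (List Char)))
    (key : List Char) (val : Option (List Char))
    (hno : pvStartsNo key = true) (h : pvInv u r d) :
    pvInv (u.insert key val) (PySem.Set.add r ('-' :: '-' :: key.drop 3)) d := by
  obtain ⟨h1, h2⟩ := h
  constructor
  · cases hc : u.contains key with
    | true =>
      rw [PySem.Dict.items_insert_of_contains u val hc]
      simp only [beq_iff_eq]
      rw [pv_filter_map_replace_false u.items key val hno, ← h1]
    | false =>
      rw [PySem.Dict.items_insert_of_not_contains u val hc, List.filter_append, ← h1]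
      simp [hno]
  · intro x
    rw [PySem.Set.mem_add r ('-' :: '-' :: key.drop 3) x]
    cases hc : u.contains key with
    | true =>
      rw [PySem.Dict.keys_insert_of_contains u val hc]
      constructor
      · rintro (hx | rfl)
        · exact (h2 x).1 hx
        · exact ⟨key, (PySem.Dict.contains_iff_mem_keys u key).1 hc, hno, rfl⟩
      · intro hx
        exact Or.inl ((h2 x).2 hx)
    | false =>
      rw [PySem.Dict.keys_insert_of_not_contains u val hc]
      constructor
      · rintro (hx | rfl)
        · rcases (h2 x).1 hx with ⟨k, hk, hkno, hxk⟩
          exact ⟨k, by simp [hk], hkno, hxk⟩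
        · exact ⟨key, by simp, hno, rfl⟩
      · rintro ⟨k, hk, hkno, hxk⟩
        rcases List.mem_append.1 hk with hk | hk
        · exact Or.inl ((h2 x).2 ⟨k, hk, hkno, hxk⟩)
        · simp only [List.mem_singleton] at hk
          subst hk
          exact Or.inr hxk

lemma pv_inv_insert_yes (u : PySem.Dict (List Char) (Option (List Char)))
    (r : PySem.Set (List Char)) (d : PySem.Dict (List Char) (Option (List Char)))
    (key : List Char) (val : Option (List Char))
    (hnob : pvStartsNo key = false) (h : pvInv u r d) :
    pvInv (u.insert key val) r (d.insert key val) := by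
  obtain ⟨h1, h2⟩ := h
  constructor
  · cases hc : u.contains key with
    | true =>
      have hdc : d.contains key = true := by
        rw [pv_contains_any] at hc ⊢
        rcases List.any_eq_true.1 hc with ⟨p, hp, hpk⟩
        refine List.any_eq_true.2 ⟨p, ?_, hpk⟩
        rw [h1, List.mem_filter]
        refine ⟨hp, ?_⟩
        have hpe : p.1 = key := by simpa using hpk
        simp [hpe, hnob]
      rw [PySem.Dict.items_insert_of_contains d val hdc,
        PySem.Dict.items_insert_of_contains u val hc]
      simp only [beq_iff_eq]
      rw [pv_filter_map_replace_true u.items key val hnob, h1]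
    | false =>
      have hdc : d.contains key = false := by
        rw [pv_contains_any] at hc ⊢
        cases hb : d.items.any (fun p => p.1 == key) with
        | false => rfl
        | true =>
          exfalso
          rcases List.any_eq_true.1 hb with ⟨p, hp, hpk⟩
          rw [h1, List.mem_filter] at hp
          have : u.items.any (fun p => p.1 == key) = true :=
            List.any_eq_true.2 ⟨p, hp.1, hpk⟩
          rw [this] at hc
          exact Bool.true_eq_false.mp hc
      rw [PySem.Dict.items_insert_of_not_contains d val hdc,
        PySem.Dict.items_insert_of_not_contains u val hc,
        List.filter_append, h1]
      simp [hnob]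
  · intro x
    cases hc : u.contains key with
    | true =>
      rw [PySem.Dict.keys_insert_of_contains u val hc]
      exact h2 x
    | false =>
      rw [PySem.Dict.keys_insert_of_not_contains u val hc, h2 x]
      constructor
      · rintro ⟨k, hk, hkno, hxk⟩
        exact ⟨k, by simp [hk], hkno, hxk⟩
      · rintro ⟨k, hk, hkno, hxk⟩
        rcases List.mem_append.1 hk with hk | hk
        · exact ⟨k, hk, hkno, hxk⟩
        · simp only [List.mem_singleton] at hk
          subst hk
          rw [hkno] at hnob
          exact absurd hnob (by simp)

lemma pv_inv_step (u : PySem.Dict (List Char) (Option (List Char)))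
    (r : PySem.Set (List Char)) (d : PySem.Dict (List Char) (Option (List Char)))
    (s : String) (h : pvInv u r d) :
    pvInv (pvUStep u s) (pvStepB (r, d) s).1 (pvStepB (r, d) s).2 := by
  simp only [pvUStep, pvStepB]
  by_cases hno : pvStartsNo (pvLstripDash (pvPartEq s.toList).1) = true
  · rw [if_pos hno]
    exact pv_inv_insert_no u r d _ _ hno h
  · rw [if_neg hno]
    exact pv_inv_insert_yes u r d _ _ (Bool.not_eq_true _ ▸ (by simpa using hno)) h

lemma pv_inv_fold (l : List String) (u : PySem.Dict (List Char) (Option (List Char)))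
    (r : PySem.Set (List Char)) (d : PySem.Dict (List Char) (Option (List Char)))
    (h : pvInv u r d) :
    pvInv (l.foldl pvUStep u) (l.foldl pvStepB (r, d)).1 (l.foldl pvStepB (r, d)).2 := by
  induction l generalizing u r d with
  | nil => exact h
  | cons s rest ih =>
    simp only [List.foldl_cons]
    have hstep := pv_inv_step u r d s h
    have hrw : (pvStepB (r, d) s) = ((pvStepB (r, d) s).1, (pvStepB (r, d) s).2) := rfl
    rw [hrw]
    exact ih _ _ _ hstep

lemma pv_foldA_snd (options : List String) (l : List String) (hl : l ≠ [])
    (st : PySem.Dict (List Char) (Option (List Char)) × List String) :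
    (l.foldl (pvStepA options) st).2 = pvExtractA options (l.foldl pvUStep st.1) := by
  induction l generalizing st with
  | nil => exact absurd rfl hl
  | cons s rest ih =>
    cases rest with
    | nil => rfl
    | cons t ts =>
      simp only [List.foldl_cons]
      exact ih (by simp) _

lemma pv_extract_eq (options : List String) (u : PySem.Dict (List Char) (Option (List Char)))
    (r : PySem.Set (List Char)) (d : PySem.Dict (List Char) (Option (List Char)))
    (h : pvInv u r d) :
    pvExtractA options u
      = (options.filter (fun opt => !(PySem.Set.contains r (pvPartEq opt.toList).1)))
          ++ d.items.map pvFmt := by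
  obtain ⟨h1, h2⟩ := h
  simp only [pvExtractA]
  have hFO : ∀ k : List Char,
      (k ∈ PySem.Set.ofList
        ((u.items.filter (fun kv => pvStartsNo kv.1 && !(PySem.Set.contains pvNoOptions kv.1))).map (·.1)))
        ↔ ∃ kv ∈ u.items, pvStartsNo kv.1 = true ∧ kv.1 = k := by
    intro k
    rw [PySem.Set.mem_ofList]
    simp only [List.mem_map, List.mem_filter, pvA_pred_eq]
    constructor
    · rintro ⟨kv, ⟨hkv, hno⟩, rfl⟩
      exact ⟨kv, hkv, hno, rfl⟩
    · rintro ⟨kv, hkv, hno, rfl⟩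
      exact ⟨kv, ⟨hkv, hno⟩, rfl⟩
  congr 1
  · -- the option filters agree pointwise
    apply List.filter_congr
    intro opt _
    congr 1
    have hiff : ((pvPartEq opt.toList).1 ∈ PySem.Set.ofList
        ((PySem.Set.ofList
          ((u.items.filter (fun kv => pvStartsNo kv.1 && !(PySem.Set.contains pvNoOptions kv.1))).map (·.1))).map
            (fun k => '-' :: '-' :: k.drop 3)))
        ↔ (pvPartEq opt.toList).1 ∈ r := by
      rw [PySem.Set.mem_ofList, h2]
      constructor
      · intro hk
        rcases List.mem_map.1 hk with ⟨k, hkmem, hkeq⟩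
        rcases (hFO k).1 hkmem with ⟨kv, hkv, hno, rfl⟩
        exact ⟨kv.1, List.mem_map.2 ⟨kv, hkv, rfl⟩, hno, hkeq.symm⟩
      · rintro ⟨k, hk, hno, hxeq⟩
        rcases List.mem_map.1 hk with ⟨kv, hkv, rfl⟩
        exact List.mem_map.2 ⟨kv.1, (hFO kv.1).2 ⟨kv, hkv, hno, rfl⟩, hxeq.symm⟩
    rw [pv_set_contains_eq_decide, pv_set_contains_eq_decide]
    exact decide_eq_decide.2 hiff
  · -- A's extend over non-'no-' keys is exactly B's additions dict
    rw [h1]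
    congr 1
    apply List.filter_congr
    intro kv hkv
    congr 1
    have hiff : (kv.1 ∈ PySem.Set.ofList
        ((u.items.filter (fun kv => pvStartsNo kv.1 && !(PySem.Set.contains pvNoOptions kv.1))).map (·.1)))
        ↔ pvStartsNo kv.1 = true := by
      rw [hFO kv.1]
      constructor
      · rintro ⟨kv', hkv', hno, heq⟩
        rw [← heq]
        exact hno
      · intro hno
        exact ⟨kv, hkv, hno, rfl⟩
    rw [pv_set_contains_eq_decide, decide_eq_decide.2 hiff]
    · simp
    · infer_instance

-- ===== VERDICT (by name: the statement is the Claim_ definition above) =====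
theorem append_pandoc_options_spec : Claim_equal_append_pandoc_options := by
  intro options updates _
  unfold Spec_append_pandoc_options
  cases updates with
  | nil => rfl
  | cons s rest =>
    have hne : s :: rest ≠ [] := by simp
    simp only [append_pandoc_options, append_pandoc_options_alt, List.isEmpty_cons,
      Bool.false_eq_true, if_false]
    have h0 : pvInv PySem.Dict.empty (PySem.Set.empty) PySem.Dict.empty := by
      constructor
      · rfl
      · intro x
        constructor
        · intro hx
          exact absurd hx (by simp [PySem.Set.empty])
        · rintro ⟨k, hk, -, -⟩
          exact absurd hk (by simp [PySem.Dict.keys_empty])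
    have hinv := pv_inv_fold (s :: rest) PySem.Dict.empty PySem.Set.empty PySem.Dict.empty h0
    rw [pv_foldA_snd options (s :: rest) hne]
    exact pv_extract_eq options _ _ _ hinv
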